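-- pv_equiv track=rewrite | github.com/chintan8195/Leetcode-practice | leetcode/752. Open the Lock.py | avoid_deadends
-- ===== SOURCE A (Python) =====
-- import collections
--
-- def avoid_deadends(deadends,target):
--     q = collections.deque([("0000",0)])
--     visited = set(deadends)
--
--     while q:
--         size = len(q)
--         for i in range(size):
--             comb, depth = q.popleft()
--             if comb in visited:
--                 continue
--             if comb==target:
--                 return depth
--             visited.add(comb)
--             values = neighbors(comb)
--             for neighbor in values:
--                 if neighbor not in visited:
--                     q.append((neighbor,depth+1))
--     return -1
--
-- def neighbors(node):
--     res = []
--     for i,c in enumerate(node):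
--         num = int(c)
--         res.append(node[:i]+str((num-1)%10)+node[i+1:])
--         res.append(node[:i]+str((num+1)%10)+node[i+1:])
--     return res
-- ===== SOURCE B (Python) =====
-- def avoid_deadends(deadends, target):
--     # Bellman-Ford-style dynamic programming: keep a distance table and
--     # repeatedly relax every known state until the target appears in the
--     # table or the table stops growing (fixpoint); no queue, no frontier.
--     dead = set(deadends)
--     dist = {} if "0000" in dead else {"0000": 0}
--     nbrs = {}
--     while True:
--         if target in dist:
--             return dist[target]
--         relaxed = dict(dist)
--         for s, d in dist.items():
--             if s not in nbrs:
--                 nbrs[s] = neighbors(s)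
--             for nb in nbrs[s]:
--                 if nb not in dead and nb not in relaxed:
--                     relaxed[nb] = d + 1
--         if len(relaxed) == len(dist):
--             return -1
--         dist = relaxed
--
--
-- def neighbors(node):
--     res = []
--     for i, c in enumerate(node):
--         num = int(c)
--         res.append(node[:i] + str((num - 1) % 10) + node[i + 1:])
--         res.append(node[:i] + str((num + 1) % 10) + node[i + 1:])
--     return res
-- ===== Notes on version B (the rewrite author's own statement) =====
-- stated objective: alternative
-- what changed: Replaced the BFS queue by Bellman-Ford-style dynamic programming: a distance table (with a neighbors memo) is repeatedly relaxed over all known states until the target appears in the table or the table reaches a fixpoint; there is no queue, frontier or separate visited set.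
import Mathlib
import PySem

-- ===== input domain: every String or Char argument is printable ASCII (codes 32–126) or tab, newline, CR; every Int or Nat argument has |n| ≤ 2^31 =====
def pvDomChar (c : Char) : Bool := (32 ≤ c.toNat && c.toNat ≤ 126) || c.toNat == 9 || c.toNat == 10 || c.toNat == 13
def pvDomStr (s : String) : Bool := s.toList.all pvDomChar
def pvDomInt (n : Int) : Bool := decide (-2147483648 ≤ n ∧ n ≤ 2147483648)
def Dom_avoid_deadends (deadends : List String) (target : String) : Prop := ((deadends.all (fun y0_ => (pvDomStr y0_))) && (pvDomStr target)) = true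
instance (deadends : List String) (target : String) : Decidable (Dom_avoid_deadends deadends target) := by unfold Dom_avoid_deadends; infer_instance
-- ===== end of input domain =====

-- B replaces A's BFS queue by Bellman-Ford-style dynamic programming: a distance
-- table repeatedly relaxed over ALL known states until the target appears in the
-- table or the table stops growing (fixpoint), with a memo for neighbors.
-- The Lean loops carry a fuel counter as a totality guard only; the state space has
-- at most 10000 combinations, so far fewer rounds than the fuel, and the fuel branch
-- is never reached.

-- ===== PORT A =====

-- helper `neighbors` of the Python module (A and B both use the identical helper).
-- int(c) is ported as (PySem.Int.ofStr? …).getD 0: `neighbors` is only ever applied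
-- to 4-digit strings, where ofStr? is `some`.  Python `+` on str is ported exactly as
-- list append on the code points.
def neighbors (node : String) : List String :=
  (PySem.List.enumerate node.toList 0).foldl (init := []) fun res p =>
    let num : Int := (PySem.Int.ofStr? (String.ofList [p.2])).getD 0
    let pre := (PySem.Str.slice node none (some p.1)).toList
    let post := (PySem.Str.slice node (some (p.1 + 1)) none).toList
    res ++ [String.ofList (pre ++ (PySem.Int.toStr (PySem.Int.mod (num - 1) 10)).toList ++ post),
            String.ofList (pre ++ (PySem.Int.toStr (PySem.Int.mod (num + 1) 10)).toList ++ post)]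

-- the body of `for i in range(size)`: pops `n` entries from the front of q
-- (.inl d = the `return depth` inside the loop; .inr = state after the for-loop)
def innerA (target : String) : Nat → List (String × Int) → Std.HashSet String →
    List (String × Int) → Sum Int (List (String × Int) × Std.HashSet String)
  | 0, _, v, acc => .inr (acc.reverse, v)
  | _ + 1, [], v, acc => .inr (acc.reverse, v)   -- dead branch: n = len(q) on every call, so popleft never sees an empty deque
  | n + 1, (comb, depth) :: rest, v, acc =>
      if comb ∈ v then innerA target n rest v acc
      else if comb = target then .inl depth
      else
        innerA target n rest (v.insert comb)
          ((((neighbors comb).filter (fun nb => !(decide (nb ∈ v.insert comb)))).map (fun nb => (nb, depth + 1))).reverse ++ acc)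

-- the `while q` loop (fuel is a totality guard only, never reached)
def outerA (target : String) : Nat → List (String × Int) → Std.HashSet String → Int
  | 0, _, _ => -1
  | f + 1, q, v =>
      if q = [] then -1
      else
        match innerA target q.length q v [] with
        | .inl d => d
        | .inr (q', v') => outerA target f q' v'

def avoid_deadends (deadends : List String) (target : String) : Int :=
  outerA target 20001 [("0000", 0)] (Std.HashSet.ofList deadends)

-- ===== PORT B =====

-- first-match lookup in the distance table (`target in dist` / `dist[target]`)
def findVal : List (String × Int) → String → Option Int
  | [], _ => none
  | (s, d) :: rest, x => if s = x then some d else findVal rest x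

-- inner `for nb in nbrs[s]` loop of one relaxation step; the growing dict `relaxed`
-- is represented as dist ++ addsRev.reverse, with `ks` a mirror of its key set
-- (same keys; used for the O(1) `nb not in relaxed` membership test).
def relaxNbrs (dead : Std.HashSet String) (d : Int) :
    List String → List (String × Int) → Std.HashSet String →
    List (String × Int) × Std.HashSet String
  | [], addsRev, ks => (addsRev, ks)
  | nb :: nbs, addsRev, ks =>
      if nb ∈ dead ∨ nb ∈ ks then relaxNbrs dead d nbs addsRev ks
      else relaxNbrs dead d nbs ((nb, d + 1) :: addsRev) (ks.insert nb)

-- the `for s, d in dist.items()` sweep, threading the neighbors memo `nbrs`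
def relaxRound (dead : Std.HashSet String) :
    List (String × Int) → Std.HashMap String (List String) →
    List (String × Int) → Std.HashSet String →
    List (String × Int) × Std.HashSet String × Std.HashMap String (List String)
  | [], cache, addsRev, ks => (addsRev, ks, cache)
  | (s, d) :: rest, cache, addsRev, ks =>
      match cache[s]? with
      | some l =>
          let (addsRev', ks') := relaxNbrs dead d l addsRev ks
          relaxRound dead rest cache addsRev' ks'
      | none =>
          let l := neighbors s
          let (addsRev', ks') := relaxNbrs dead d l addsRev ks
          relaxRound dead rest (cache.insert s l) addsRev' ks'

-- the `while True` fixpoint loop of B (fuel is a totality guard only, never reached)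
def loopB (dead : Std.HashSet String) (target : String) :
    Nat → List (String × Int) → Std.HashSet String →
    Std.HashMap String (List String) → Int
  | 0, _, _, _ => -1
  | f + 1, dist, ks, cache =>
      match findVal dist target with
      | some v => v
      | none =>
          match relaxRound dead dist cache [] ks with
          | (addsRev, ks', cache') =>
            if addsRev = [] then -1     -- len(relaxed) == len(dist): fixpoint
            else loopB dead target f (dist ++ addsRev.reverse) ks' cache'

def avoid_deadends_alt (deadends : List String) (target : String) : Int :=
  let dead := Std.HashSet.ofList deadends
  let dist : List (String × Int) := if "0000" ∈ dead then [] else [("0000", 0)]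
  loopB dead target 20001 dist (Std.HashSet.ofList (dist.map Prod.fst))
    (Std.HashMap.emptyWithCapacity)

-- ===== PRECONDITION & SPEC =====
def Spec_avoid_deadends (deadends : List String) (target : String) (out : Int) : Prop := out = avoid_deadends_alt deadends target
instance (deadends : List String) (target : String) (out : Int) : Decidable (Spec_avoid_deadends deadends target out) := by unfold Spec_avoid_deadends; infer_instance

-- ===== CLAIM (what is proved, stated in full; the proofs are below) =====
def Claim_equal_avoid_deadends : Prop := ∀ (deadends : List String) (target : String), Dom_avoid_deadends deadends target → Spec_avoid_deadends deadends target (avoid_deadends deadends target)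

-- ===== LEMMAS AND PROOFS =====

-- Both programs are shown equal to one reference level-BFS over Finsets (the fuel
-- counters advance in lockstep: one outer iteration of either loop = one level).

def nbrF (c : String) : Finset String := (neighbors c).toFinset

-- the set of new combinations one level ahead of frontier fr, visited set vis
def exF (vis fr : Finset String) : Finset String := (fr.biUnion nbrF) \ vis

def refBFS (target : String) : Nat → Finset String → Finset String → Int → Int
  | 0, _, _, _ => -1
  | f + 1, vis, fr, k =>
      if fr = ∅ then -1
      else if target ∈ exF vis fr then k + 1
      else refBFS target f (vis ∪ exF vis fr) (exF vis fr) (k + 1)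

-- Python's `set` is modelled with Std.HashSet (exact for the membership/insert
-- operations these programs use; iteration order is never consumed).
theorem hsMemInsert (v : Std.HashSet String) (c x : String) :
    x ∈ v.insert c ↔ x ∈ v ∨ x = c := by
  simp [Std.HashSet.mem_insert]; tauto


-- ---- A side ----

-- innerA with the append-to-the-back of the queue disentangled: procA processes a
-- level structurally and returns the appended entries separately.
def procA (target : String) : List (String × Int) → Std.HashSet String →
    Sum Int (List (String × Int) × Std.HashSet String)
  | [], v => .inr ([], v)
  | (comb, depth) :: rest, v =>
      if comb ∈ v then procA target rest v
      else if comb = target then .inl depth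
      else
        match procA target rest (v.insert comb) with
        | .inl r => .inl r
        | .inr (app, v'') =>
            .inr ((((neighbors comb).filter (fun nb => !(decide (nb ∈ v.insert comb)))).map (fun nb => (nb, depth + 1))) ++ app, v'')

theorem innerA_eq_procA (target : String) (level : List (String × Int)) :
    ∀ (acc : List (String × Int)) (v : Std.HashSet String),
    innerA target level.length level v acc =
      match procA target level v with
      | .inl d => .inl d
      | .inr (app, v') => .inr (acc.reverse ++ app, v') := by
  induction level with
  | nil => intro acc v; simp [innerA, procA]
  | cons p rest ih =>
      intro acc v
      obtain ⟨comb, depth⟩ := p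
      simp only [List.length_cons, innerA, procA]
      by_cases hv : comb ∈ v
      · rw [if_pos hv, if_pos hv]; exact ih acc v
      · rw [if_neg hv, if_neg hv]
        by_cases ht : comb = target
        · rw [if_pos ht, if_pos ht]
        · rw [if_neg ht, if_neg ht, ih]
          cases h : procA target rest (v.insert comb) with
          | inl r => rfl
          | inr pr =>
              obtain ⟨app, v''⟩ := pr
              simp [List.reverse_append, List.append_assoc]

-- a fresh pop equal to target returns the level's common depth tag
theorem procA_found (target : String) (level : List (String × Int)) :
    ∀ (v : Std.HashSet String) (d : Int), (∀ p ∈ level, p.2 = d) →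
    target ∈ level.map Prod.fst → target ∉ v →
    procA target level v = .inl d := by
  induction level with
  | nil => intro v d _ h; simp at h
  | cons p rest ih =>
      intro v d htag hmem hnv
      obtain ⟨comb, depth⟩ := p
      have hd : depth = d := htag _ (List.mem_cons_self)
      by_cases hv : comb ∈ v
      · have hne : target ≠ comb := fun h => hnv (h ▸ hv)
        have : target ∈ rest.map Prod.fst := by
          simp only [List.map_cons, List.mem_cons] at hmem
          tauto
        simp only [procA, if_pos hv]
        exact ih v d (fun q hq => htag q (List.mem_cons_of_mem _ hq)) this hnv
      · by_cases ht : comb = target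
        · simp only [procA, if_neg hv, if_pos ht, hd]
        · have hne : target ≠ comb := fun h => ht h.symm
          have hmem' : target ∈ rest.map Prod.fst := by
            simp only [List.map_cons, List.mem_cons] at hmem
            tauto
          have hnv' : target ∉ v.insert comb := by
            rw [hsMemInsert]; rintro (h | h); exact hnv h; exact hne h
          simp only [procA, if_neg hv, if_neg ht]
          rw [ih (v.insert comb) d (fun q hq => htag q (List.mem_cons_of_mem _ hq)) hmem' hnv']

-- no fresh target in the level: procA completes the level; the new visited set is
-- v union (level's combinations), and the appended entries' fresh part is exactly the
-- neighbours of the level's fresh combinations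
theorem procA_done (target : String) (level : List (String × Int)) :
    ∀ (v : Std.HashSet String) (d : Int), (∀ p ∈ level, p.2 = d) →
    ¬ (target ∈ level.map Prod.fst ∧ target ∉ v) →
    ∃ app v',
      procA target level v = .inr (app, v') ∧
      (∀ p ∈ app, p.2 = d + 1) ∧
      (∀ x, x ∈ v' ↔ x ∈ v ∨ x ∈ level.map Prod.fst) ∧
      (∀ x, x ∈ app.map Prod.fst → ∃ c, c ∈ level.map Prod.fst ∧ c ∉ v ∧ x ∈ neighbors c) ∧
      (∀ x, (x ∈ app.map Prod.fst ∧ x ∉ v') ↔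
        ((∃ c, c ∈ level.map Prod.fst ∧ c ∉ v ∧ x ∈ neighbors c) ∧ x ∉ v')) := by
  induction level with
  | nil =>
      intro v d _ _
      exact ⟨[], v, rfl, by simp, by simp, by simp, by simp⟩
  | cons p rest ih =>
      intro v d htag hng
      obtain ⟨comb, depth⟩ := p
      have hd : depth = d := htag _ (List.mem_cons_self)
      have htag' : ∀ q ∈ rest, q.2 = d := fun q hq => htag q (List.mem_cons_of_mem _ hq)
      by_cases hv : comb ∈ v
      · have hng' : ¬ (target ∈ rest.map Prod.fst ∧ target ∉ v) := by
          intro ⟨h1, h2⟩; exact hng ⟨by simp [h1], h2⟩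
        obtain ⟨app, v', heq, htg, hv', hjunk, happ⟩ := ih v d htag' hng'
        refine ⟨app, v', by simp [procA, hv, heq], htg, ?_, ?_, ?_⟩
        · intro x; rw [hv' x]; simp only [List.map_cons, List.mem_cons]
          constructor
          · rintro (h | h); exact Or.inl h; exact Or.inr (Or.inr h)
          · rintro (h | h | h)
            · exact Or.inl h
            · exact Or.inl (h ▸ hv)
            · exact Or.inr h
        · intro x hx
          obtain ⟨c, hc1, hc2, hc3⟩ := hjunk x hx
          exact ⟨c, by simp [hc1], hc2, hc3⟩
        · intro x
          rw [happ x]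
          constructor
          · rintro ⟨⟨c, hc1, hc2, hc3⟩, h4⟩
            exact ⟨⟨c, by simp [hc1], hc2, hc3⟩, h4⟩
          · rintro ⟨⟨c, hc1, hc2, hc3⟩, h4⟩
            simp only [List.map_cons, List.mem_cons] at hc1
            rcases hc1 with h | h
            · exact absurd (h ▸ hv) hc2
            · exact ⟨⟨c, h, hc2, hc3⟩, h4⟩
      · have ht : comb ≠ target := by
          intro h; exact hng ⟨by simp [h], fun hc => hv (h ▸ hc)⟩
        have hng' : ¬ (target ∈ rest.map Prod.fst ∧ target ∉ v.insert comb) := by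
          rintro ⟨h1, h2⟩
          rw [hsMemInsert] at h2
          push_neg at h2
          exact hng ⟨by simp [h1], h2.1⟩
        obtain ⟨app, v'', heq, htg, hv'', hjunk, happ⟩ := ih (v.insert comb) d htag' hng'
        refine ⟨((neighbors comb).filter (fun nb => !(decide (nb ∈ v.insert comb)))).map
            (fun nb => (nb, depth + 1)) ++ app, v'', ?_, ?_, ?_, ?_, ?_⟩
        · simp only [procA, if_neg hv, if_neg ht, heq]
        · intro q hq
          rcases List.mem_append.1 hq with h | h
          · obtain ⟨nb, _, rfl⟩ := List.mem_map.1 h; simp [hd]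
          · exact htg q h
        · intro x
          rw [hv'' x, hsMemInsert]
          simp only [List.map_cons, List.mem_cons]
          tauto
        · intro x hx
          simp only [List.map_append, List.mem_append, List.map_map] at hx
          rcases hx with h | h
          · obtain ⟨nb, hnb, rfl⟩ := List.mem_map.1 h
            have := List.mem_filter.1 hnb
            exact ⟨comb, by simp, hv, this.1⟩
          · obtain ⟨c, hc1, hc2, hc3⟩ := hjunk x h
            rw [hsMemInsert] at hc2; push_neg at hc2
            exact ⟨c, by simp [hc1], hc2.1, hc3⟩
        · intro x
          constructor
          · rintro ⟨hx, hnx⟩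
            simp only [List.map_append, List.mem_append, List.map_map] at hx
            rcases hx with h | h
            · obtain ⟨nb, hnb, rfl⟩ := List.mem_map.1 h
              have := List.mem_filter.1 hnb
              exact ⟨⟨comb, by simp, hv, this.1⟩, hnx⟩
            · obtain ⟨⟨c, hc1, hc2, hc3⟩, h4⟩ := (happ x).1 ⟨h, hnx⟩
              rw [hsMemInsert] at hc2; push_neg at hc2
              exact ⟨⟨c, by simp [hc1], hc2.1, hc3⟩, h4⟩
          · rintro ⟨⟨c, hc1, hc2, hc3⟩, h4⟩
            refine ⟨?_, h4⟩
            simp only [List.map_append, List.mem_append, List.map_map]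
            simp only [List.map_cons, List.mem_cons] at hc1
            by_cases hcc : c = comb
            · left
              subst hcc
              have hx1 : x ∉ v.insert c :=
                fun hmem => h4 ((hv'' x).2 (Or.inl hmem))
              refine List.mem_map.2 ⟨x, List.mem_filter.2 ⟨hc3, by simpa using hx1⟩, rfl⟩
            · right
              rcases hc1 with h | h
              · exact absurd h hcc
              · have hc2' : c ∉ v.insert comb := by
                  rw [hsMemInsert]; rintro (hh | hh); exact hc2 hh; exact hcc hh
                exact ((happ x).2 ⟨⟨c, h, hc2', hc3⟩, h4⟩).1

theorem outerA_nil (target : String) (f : Nat) (v : Std.HashSet String) :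
    outerA target (f + 1) [] v = -1 := by
  simp [outerA]

theorem outerA_step (target : String) (f : Nat) (q : List (String × Int))
    (v : Std.HashSet String) (h : q ≠ []) :
    outerA target (f + 1) q v =
      match innerA target q.length q v [] with
      | .inl d => d
      | .inr (q', v') => outerA target f q' v' := by
  simp only [outerA, if_neg h]

-- one outer iteration of A per refBFS level, A one fuel unit ahead (A sees target on
-- POP, one level after refBFS sees it in the expansion)
theorem outerA_eq_ref (target : String) (f : Nat) :
    ∀ (level : List (String × Int)) (v : Std.HashSet String) (vis fr : Finset String) (k : Int),
    (∀ p ∈ level, p.2 = k) →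
    (∀ x, x ∈ vis ↔ x ∈ v ∨ x ∈ level.map Prod.fst) →
    (∀ x, x ∈ fr ↔ x ∈ level.map Prod.fst ∧ x ∉ v) →
    ¬ (target ∈ level.map Prod.fst ∧ target ∉ v) →
    outerA target (f + 1) level v = refBFS target f vis fr k := by
  induction f with
  | zero =>
      intro level v vis fr k htag hvis hfr htgt
      by_cases hnil : level = []
      · subst hnil; simp [outerA, refBFS]
      · obtain ⟨app, v', heq, _, _, _, _⟩ := procA_done target level v k htag htgt
        have hre := innerA_eq_procA target level [] v
        simp only [List.reverse_nil, List.nil_append] at hre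
        simp only [outerA, if_neg hnil, hre, heq, refBFS]
  | succ f ih =>
      intro level v vis fr k htag hvis hfr htgt
      obtain ⟨app, v', heq, htg', hv', hjunk, happ⟩ := procA_done target level v k htag htgt
      have hre := innerA_eq_procA target level [] v
      simp only [List.reverse_nil, List.nil_append] at hre
      have hvv' : ∀ x, x ∈ v' ↔ x ∈ vis := by
        intro x; rw [hv' x, hvis x]
      have hex : ∀ x, x ∈ exF vis fr ↔ (x ∈ app.map Prod.fst ∧ x ∉ v') := by
        intro x
        rw [happ x]
        simp only [exF, Finset.mem_sdiff, Finset.mem_biUnion, nbrF, List.mem_toFinset]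
        constructor
        · rintro ⟨⟨c, hc, hxc⟩, hnvis⟩
          rw [hfr c] at hc
          exact ⟨⟨c, hc.1, hc.2, hxc⟩, fun h => hnvis ((hvv' x).1 h)⟩
        · rintro ⟨⟨c, hc1, hc2, hc3⟩, hnv'⟩
          exact ⟨⟨c, (hfr c).2 ⟨hc1, hc2⟩, hc3⟩, fun h => hnv' ((hvv' x).2 h)⟩
      by_cases hfre : fr = ∅
      · by_cases hnil : level = []
        · subst hnil; simp [outerA, refBFS, hfre]
        · have happnil : app = [] := by
            cases happ' : app.map Prod.fst with
            | nil => cases app with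
              | nil => rfl
              | cons a l => simp at happ'
            | cons x l =>
                obtain ⟨c, hc1, hc2, _⟩ := hjunk x (by rw [happ']; exact List.mem_cons_self)
                have : c ∈ fr := (hfr c).2 ⟨hc1, hc2⟩
                rw [hfre] at this; simp at this
          simp only [outerA, if_neg hnil, hre, heq, happnil, refBFS, if_pos hfre]
          exact outerA_nil target f v'
      · have hnil : level ≠ [] := by
          intro h; subst h
          apply hfre
          ext x; rw [hfr x]; simp
        by_cases hfound : target ∈ exF vis fr
        · have h2 := (hex target).1 hfound
          have happne : app ≠ [] := by
            intro h; rw [h] at h2; simp at h2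
          have hfind := procA_found target app v' (k + 1) htg' h2.1 h2.2
          have hre2 := innerA_eq_procA target app [] v'
          simp only [List.reverse_nil, List.nil_append] at hre2
          rw [hfind] at hre2
          simp only [outerA, if_neg hnil, hre, heq]
          rw [if_neg happne, hre2]
          simp [refBFS, hfre, hfound]
        · have step : outerA target (f + 2) level v = outerA target (f + 1) app v' := by
            simp only [outerA, if_neg hnil, hre, heq]
          rw [step]
          have := ih app v' (vis ∪ exF vis fr) (exF vis fr) (k + 1) htg'
            (by
              intro x
              rw [Finset.mem_union]
              constructor
              · rintro (h | h)
                · exact Or.inl ((hvv' x).2 h)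
                · exact Or.inr ((hex x).1 h).1
              · rintro (h | h)
                · exact Or.inl ((hvv' x).1 h)
                · by_cases hx : x ∈ v'
                  · exact Or.inl ((hvv' x).1 hx)
                  · exact Or.inr ((hex x).2 ⟨h, hx⟩))
            (by intro x; rw [hex x])
            (by rw [← hex target]; exact hfound)
          rw [this]
          simp [refBFS, hfre, hfound]

-- ---- B side ----

-- the neighbors memo is only ever read back as what it stored
def CacheOK (cache : Std.HashMap String (List String)) : Prop :=
  ∀ s l, cache[s]? = some l → l = neighbors s

theorem findVal_none (dist : List (String × Int)) (x : String)
    (h : x ∉ dist.map Prod.fst) : findVal dist x = none := by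
  induction dist with
  | nil => rfl
  | cons p rest ih =>
      obtain ⟨s, v⟩ := p
      simp only [List.map_cons, List.mem_cons, not_or] at h
      have hne : ¬ (s = x) := fun he => h.1 he.symm
      simp only [findVal, if_neg hne]
      exact ih h.2

theorem findVal_append_right (dist₁ dist₂ : List (String × Int)) (x : String)
    (h : x ∉ dist₁.map Prod.fst) :
    findVal (dist₁ ++ dist₂) x = findVal dist₂ x := by
  induction dist₁ with
  | nil => rfl
  | cons p rest ih =>
      obtain ⟨s, v⟩ := p
      simp only [List.map_cons, List.mem_cons, not_or] at h
      have hne : ¬ (s = x) := fun he => h.1 he.symm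
      simp only [List.cons_append, findVal, if_neg hne]
      exact ih h.2

theorem findVal_some_of_mem (dist : List (String × Int)) (x : String) (d : Int)
    (hm : (x, d) ∈ dist) (hnd : (dist.map Prod.fst).Nodup) :
    findVal dist x = some d := by
  induction dist with
  | nil => simp at hm
  | cons p rest ih =>
      simp only [List.map_cons, List.nodup_cons] at hnd
      rcases List.mem_cons.1 hm with h | h
      · subst h; simp [findVal]
      · have : p.1 ≠ x := by
          intro he
          exact hnd.1 (he ▸ (List.mem_map.2 ⟨(x, d), h, rfl⟩))
        obtain ⟨s, v⟩ := p
        simp only [findVal, if_neg this]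
        exact ih h hnd.2

-- one inner relaxation sweep over a neighbor list
theorem relaxNbrs_spec (dead : Std.HashSet String) (d : Int) (nbs : List String) :
    ∀ (addsRev : List (String × Int)) (ks : Std.HashSet String),
    ∃ addsRev' ks',
      relaxNbrs dead d nbs addsRev ks = (addsRev', ks') ∧
      (∀ x, x ∈ ks' ↔ x ∈ ks ∨ (x ∈ nbs ∧ x ∉ dead)) ∧
      (∀ p, p ∈ addsRev' ↔ p ∈ addsRev ∨
        (p.1 ∈ nbs ∧ p.1 ∉ dead ∧ p.1 ∉ ks ∧ p.2 = d + 1)) ∧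
      ((∀ x ∈ addsRev.map Prod.fst, x ∈ ks) → (addsRev.map Prod.fst).Nodup →
        (∀ x ∈ addsRev'.map Prod.fst, x ∈ ks') ∧ (addsRev'.map Prod.fst).Nodup) := by
  induction nbs with
  | nil =>
      intro addsRev ks
      exact ⟨addsRev, ks, rfl, by simp, by simp, fun h1 h2 => ⟨h1, h2⟩⟩
  | cons nb nbs ih =>
      intro addsRev ks
      by_cases hskip : nb ∈ dead ∨ nb ∈ ks
      · obtain ⟨a', k', heq, hks, hmem, hnod⟩ := ih addsRev ks
        refine ⟨a', k', by simp only [relaxNbrs, if_pos hskip, heq], ?_, ?_, hnod⟩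
        · intro x
          rw [hks x]
          simp only [List.mem_cons]
          constructor
          · rintro (h | ⟨h1, h2⟩)
            · exact Or.inl h
            · exact Or.inr ⟨Or.inr h1, h2⟩
          · rintro (h | ⟨h1 | h1, h2⟩)
            · exact Or.inl h
            · subst h1
              rcases hskip with h | h
              · exact absurd h h2
              · exact Or.inl h
            · exact Or.inr ⟨h1, h2⟩
        · intro p
          rw [hmem p]
          simp only [List.mem_cons]
          constructor
          · rintro (h | ⟨h1, h2, h3, h4⟩)
            · exact Or.inl h
            · exact Or.inr ⟨Or.inr h1, h2, h3, h4⟩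
          · rintro (h | ⟨h1 | h1, h2, h3, h4⟩)
            · exact Or.inl h
            · subst h1
              rcases hskip with h | h
              · exact absurd h h2
              · exact absurd h h3
            · exact Or.inr ⟨h1, h2, h3, h4⟩
      · push_neg at hskip
        obtain ⟨a', k', heq, hks, hmem, hnod⟩ := ih ((nb, d + 1) :: addsRev) (ks.insert nb)
        refine ⟨a', k', by simp only [relaxNbrs, if_neg (not_or.mpr hskip), heq], ?_, ?_, ?_⟩
        · intro x
          rw [hks x, hsMemInsert]
          simp only [List.mem_cons]
          constructor
          · rintro ((h | h) | ⟨h1, h2⟩)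
            · exact Or.inl h
            · exact Or.inr ⟨Or.inl h, h ▸ hskip.1⟩
            · exact Or.inr ⟨Or.inr h1, h2⟩
          · rintro (h | ⟨h1 | h1, h2⟩)
            · exact Or.inl (Or.inl h)
            · exact Or.inl (Or.inr h1)
            · exact Or.inr ⟨h1, h2⟩
        · intro p
          rw [hmem p]
          simp only [List.mem_cons, hsMemInsert]
          constructor
          · rintro ((h | h) | ⟨h1, h2, h3, h4⟩)
            · subst h
              exact Or.inr ⟨Or.inl rfl, hskip.1, hskip.2, rfl⟩
            · exact Or.inl h
            · exact Or.inr ⟨Or.inr h1, h2, fun hh => h3 (Or.inl hh), h4⟩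
          · rintro (h | ⟨h1 | h1, h2, h3, h4⟩)
            · exact Or.inl (Or.inr h)
            · subst h1
              left; left
              obtain ⟨p1, p2⟩ := p
              simp only at h4 ⊢
              simp [h4]
            · by_cases hx : p.1 = nb
              · left; left
                obtain ⟨p1, p2⟩ := p
                simp only at h4 hx ⊢
                simp [h4, hx]
              · exact Or.inr ⟨h1, h2, fun hh => by
                  rcases hh with hh | hh
                  · exact h3 hh
                  · exact hx hh, h4⟩
        · intro h1 h2
          apply hnod
          · intro x hx
            simp only [List.map_cons, List.mem_cons] at hx
            rw [hsMemInsert]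
            rcases hx with h | h
            · exact Or.inr h
            · exact Or.inl (h1 x h)
          · simp only [List.map_cons, List.nodup_cons]
            exact ⟨fun hh => hskip.2 (h1 nb hh), h2⟩

-- one full sweep over the distance table (`for s, d in dist.items()`)
theorem relaxRound_spec (dead : Std.HashSet String) (dist : List (String × Int)) :
    ∀ (cache : Std.HashMap String (List String)) (addsRev : List (String × Int))
      (ks : Std.HashSet String), CacheOK cache →
    ∃ addsRev' ks' cache',
      relaxRound dead dist cache addsRev ks = (addsRev', ks', cache') ∧
      CacheOK cache' ∧
      (∀ x, x ∈ ks' ↔ x ∈ ks ∨ ((∃ q ∈ dist, x ∈ neighbors q.1) ∧ x ∉ dead)) ∧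
      (∀ p, p ∈ addsRev' → p ∈ addsRev ∨
        ((∃ q ∈ dist, p.1 ∈ neighbors q.1 ∧ p.2 = q.2 + 1) ∧ p.1 ∉ dead ∧ p.1 ∉ ks)) ∧
      (∀ x, x ∈ addsRev'.map Prod.fst ↔ x ∈ addsRev.map Prod.fst ∨
        ((∃ q ∈ dist, x ∈ neighbors q.1) ∧ x ∉ dead ∧ x ∉ ks)) ∧
      ((∀ x ∈ addsRev.map Prod.fst, x ∈ ks) → (addsRev.map Prod.fst).Nodup →
        (∀ x ∈ addsRev'.map Prod.fst, x ∈ ks') ∧ (addsRev'.map Prod.fst).Nodup) := by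
  induction dist with
  | nil =>
      intro cache addsRev ks hco
      exact ⟨addsRev, ks, cache, rfl, hco, by simp, fun p hp => Or.inl hp, by simp,
        fun h1 h2 => ⟨h1, h2⟩⟩
  | cons q rest ih =>
      intro cache addsRev ks hco
      obtain ⟨s, d⟩ := q
      obtain ⟨a1, k1, heq1, hk1, hm1, hn1⟩ := relaxNbrs_spec dead d (neighbors s) addsRev ks
      have hkm1 : ∀ x, x ∈ a1.map Prod.fst ↔
          x ∈ addsRev.map Prod.fst ∨ (x ∈ neighbors s ∧ x ∉ dead ∧ x ∉ ks) := by
        intro x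
        constructor
        · intro hx
          obtain ⟨p, hp, rfl⟩ := List.mem_map.1 hx
          rcases (hm1 p).1 hp with h | ⟨h1, h2, h3, _⟩
          · exact Or.inl (List.mem_map.2 ⟨p, h, rfl⟩)
          · exact Or.inr ⟨h1, h2, h3⟩
        · rintro (hx | ⟨h1, h2, h3⟩)
          · obtain ⟨p, hp, rfl⟩ := List.mem_map.1 hx
            exact List.mem_map.2 ⟨p, (hm1 p).2 (Or.inl hp), rfl⟩
          · exact List.mem_map.2 ⟨(x, d + 1), (hm1 (x, d + 1)).2 (Or.inr ⟨h1, h2, h3, rfl⟩), rfl⟩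
      -- continue the sweep with the (possibly extended) memo
      have main : ∀ (cache2 : Std.HashMap String (List String)), CacheOK cache2 →
          relaxRound dead ((s, d) :: rest) cache addsRev ks = relaxRound dead rest cache2 a1 k1 →
          ∃ addsRev' ks' cache',
            relaxRound dead ((s, d) :: rest) cache addsRev ks = (addsRev', ks', cache') ∧
            CacheOK cache' ∧
            (∀ x, x ∈ ks' ↔ x ∈ ks ∨ ((∃ q ∈ (s, d) :: rest, x ∈ neighbors q.1) ∧ x ∉ dead)) ∧
            (∀ p, p ∈ addsRev' → p ∈ addsRev ∨
              ((∃ q ∈ (s, d) :: rest, p.1 ∈ neighbors q.1 ∧ p.2 = q.2 + 1) ∧ p.1 ∉ dead ∧ p.1 ∉ ks)) ∧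
            (∀ x, x ∈ addsRev'.map Prod.fst ↔ x ∈ addsRev.map Prod.fst ∨
              ((∃ q ∈ (s, d) :: rest, x ∈ neighbors q.1) ∧ x ∉ dead ∧ x ∉ ks)) ∧
            ((∀ x ∈ addsRev.map Prod.fst, x ∈ ks) → (addsRev.map Prod.fst).Nodup →
              (∀ x ∈ addsRev'.map Prod.fst, x ∈ ks') ∧ (addsRev'.map Prod.fst).Nodup) := by
        intro cache2 hco2 hstep
        obtain ⟨a', k', c', heq, hco', hks, hval, hkeys, hnod⟩ := ih cache2 a1 k1 hco2
        refine ⟨a', k', c', hstep.trans heq, hco', ?_, ?_, ?_, ?_⟩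
        · intro x
          rw [hks x, hk1 x]
          simp only [List.mem_cons]
          constructor
          · rintro ((h | ⟨h1, h2⟩) | ⟨⟨q, hq, hx⟩, h2⟩)
            · exact Or.inl h
            · exact Or.inr ⟨⟨(s, d), Or.inl rfl, h1⟩, h2⟩
            · exact Or.inr ⟨⟨q, Or.inr hq, hx⟩, h2⟩
          · rintro (h | ⟨⟨q, hq | hq, hx⟩, h2⟩)
            · exact Or.inl (Or.inl h)
            · subst hq; exact Or.inl (Or.inr ⟨hx, h2⟩)
            · exact Or.inr ⟨⟨q, hq, hx⟩, h2⟩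
        · intro p hp
          rcases hval p hp with h | ⟨⟨q, hq, hx, hv⟩, h2, h3⟩
          · rcases (hm1 p).1 h with h' | ⟨h1', h2', h3', h4'⟩
            · exact Or.inl h'
            · exact Or.inr ⟨⟨(s, d), List.mem_cons_self, h1', h4'⟩, h2', h3'⟩
          · exact Or.inr ⟨⟨q, List.mem_cons_of_mem _ hq, hx, hv⟩, h2,
              fun h => h3 ((hk1 p.1).2 (Or.inl h))⟩
        · intro x
          rw [hkeys x]
          constructor
          · rintro (h | ⟨⟨q, hq, hx⟩, h2, h3⟩)
            · rcases (hkm1 x).1 h with h' | ⟨h1', h2', h3'⟩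
              · exact Or.inl h'
              · exact Or.inr ⟨⟨(s, d), List.mem_cons_self, h1'⟩, h2', h3'⟩
            · exact Or.inr ⟨⟨q, List.mem_cons_of_mem _ hq, hx⟩, h2,
                fun h => h3 ((hk1 x).2 (Or.inl h))⟩
          · rintro (h | ⟨⟨q, hq, hx⟩, h2, h3⟩)
            · exact Or.inl ((hkm1 x).2 (Or.inl h))
            · rcases List.mem_cons.1 hq with hq' | hq'
              · subst hq'
                exact Or.inl ((hkm1 x).2 (Or.inr ⟨hx, h2, h3⟩))
              · by_cases hxk1 : x ∈ k1
                · rcases (hk1 x).1 hxk1 with h' | ⟨h1', h2'⟩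
                  · exact absurd h' h3
                  · exact Or.inl ((hkm1 x).2 (Or.inr ⟨h1', h2', h3⟩))
                · exact Or.inr ⟨⟨q, hq', hx⟩, h2, hxk1⟩
        · intro h1 h2
          exact hnod (hn1 h1 h2).1 (hn1 h1 h2).2
      cases hcs : cache[s]? with
      | some l =>
          have hl : l = neighbors s := hco s l hcs
          apply main cache hco
          simp only [relaxRound, hcs, hl, heq1]
      | none =>
          have hco2 : CacheOK (cache.insert s (neighbors s)) := by
            intro x l' hx
            rw [Std.HashMap.getElem?_insert] at hx
            by_cases hxs : s = x
            · subst hxs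
              simp only [beq_self_eq_true, if_pos] at hx
              exact (Option.some_inj.1 hx).symm
            · simp only [beq_iff_eq, if_neg hxs] at hx
              exact hco x l' hx
          apply main (cache.insert s (neighbors s)) hco2
          simp only [relaxRound, hcs, heq1]

-- one outer iteration of B per refBFS level, B one fuel unit ahead (B sees the target
-- in the table one round after refBFS sees it in the expansion)
theorem loopB_eq_ref (dead : Std.HashSet String) (target : String) (f : Nat) :
    ∀ (dist : List (String × Int)) (ks : Std.HashSet String)
      (cache : Std.HashMap String (List String)) (vis fr : Finset String) (k : Int),
    CacheOK cache →
    (dist.map Prod.fst).Nodup →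
    (∀ x, x ∈ ks ↔ x ∈ dist.map Prod.fst) →
    (∀ x, x ∈ vis ↔ x ∈ dead ∨ x ∈ dist.map Prod.fst) →
    (∀ x ∈ fr, x ∈ dist.map Prod.fst) →
    (∀ p ∈ dist, p.1 ∈ fr → p.2 = k) →
    (∀ p ∈ dist, p.1 ∉ fr → ∀ nb ∈ neighbors p.1, nb ∈ vis) →
    target ∉ dist.map Prod.fst →
    loopB dead target (f + 1) dist ks cache = refBFS target f vis fr k := by
  induction f with
  | zero =>
      intro dist ks cache vis fr k hco hnd hks hvis hfr htag hcl htgt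
      have hfind : findVal dist target = none := findVal_none dist target htgt
      obtain ⟨adds, ks', cache', heq, _, _, _, _, _⟩ :=
        relaxRound_spec dead dist cache [] ks hco
      by_cases hadds : adds = [] <;>
        simp only [loopB, hfind, heq, hadds, if_pos, if_neg, refBFS, if_true, if_false,
          reduceIte] <;> simp [loopB, refBFS, hadds]
  | succ f ih =>
      intro dist ks cache vis fr k hco hnd hks hvis hfr htag hcl htgt
      have hfind : findVal dist target = none := findVal_none dist target htgt
      obtain ⟨adds, ks', cache', heq, hco', hks', hval, hkeys, hnodf⟩ :=
        relaxRound_spec dead dist cache [] ks hco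
      have hkeysA : ∀ x, x ∈ adds.map Prod.fst ↔
          ((∃ q ∈ dist, x ∈ neighbors q.1) ∧ x ∉ dead ∧ x ∉ ks) := by
        intro x; rw [hkeys x]; simp
      have hAddsEx : ∀ x, x ∈ adds.map Prod.fst ↔ x ∈ exF vis fr := by
        intro x
        rw [hkeysA x]
        simp only [exF, Finset.mem_sdiff, Finset.mem_biUnion, nbrF, List.mem_toFinset]
        constructor
        · rintro ⟨⟨q, hq, hx⟩, h2, h3⟩
          have hxvis : x ∉ vis := by
            rw [hvis x]
            rintro (h | h)
            · exact h2 h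
            · exact h3 ((hks x).2 h)
          have hqfr : q.1 ∈ fr := by
            by_contra hnf
            exact hxvis (hcl q hq hnf x hx)
          exact ⟨⟨q.1, hqfr, hx⟩, hxvis⟩
        · rintro ⟨⟨c, hc, hx⟩, hnv⟩
          obtain ⟨q, hq, hq1⟩ := List.mem_map.1 (hfr c hc)
          exact ⟨⟨q, hq, hq1 ▸ hx⟩, fun h => hnv ((hvis x).2 (Or.inl h)),
            fun h => hnv ((hvis x).2 (Or.inr ((hks x).1 h)))⟩
      have hVal21 : ∀ p ∈ adds, p.2 = k + 1 := by
        intro p hp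
        rcases hval p hp with h | ⟨⟨q, hq, hx, hv⟩, h2, h3⟩
        · simp at h
        · have hpvis : p.1 ∉ vis := by
            rw [hvis p.1]
            rintro (h | h)
            · exact h2 h
            · exact h3 ((hks p.1).2 h)
          have hqfr : q.1 ∈ fr := by
            by_contra hnf
            exact hpvis (hcl q hq hnf p.1 hx)
          rw [hv, htag q hq hqfr]
      have hnodadds : (adds.map Prod.fst).Nodup := (hnodf (by simp) (by simp)).2
      by_cases hadds : adds = []
      · have hexE : exF vis fr = ∅ := by
          apply Finset.eq_empty_iff_forall_notMem.2
          intro x hx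
          have := (hAddsEx x).2 hx
          rw [hadds] at this
          simp at this
        have hB : loopB dead target (f + 1 + 1) dist ks cache = -1 := by
          simp only [loopB, hfind, heq, if_pos hadds]
        rw [hB]
        by_cases hfre : fr = ∅
        · simp [refBFS, hfre]
        · simp only [refBFS, if_neg hfre, hexE]
          rw [if_neg (by simp)]
          cases f with
          | zero => rfl
          | succ f' => simp [refBFS]
      · by_cases hfound : target ∈ exF vis fr
        · have hfre : fr ≠ ∅ := by
            intro h
            rw [h] at hfound
            simp [exF] at hfound
          have htk : target ∈ adds.map Prod.fst := (hAddsEx target).2 hfound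
          obtain ⟨p, hp, hp1⟩ := List.mem_map.1 htk
          have hpt : p = (target, k + 1) := by
            obtain ⟨p1, p2⟩ := p
            have := hVal21 (p1, p2) hp
            simp only at hp1 this
            rw [hp1, this]
          have hfd2 : findVal (dist ++ adds.reverse) target = some (k + 1) := by
            rw [findVal_append_right _ _ _ htgt]
            apply findVal_some_of_mem
            · rw [List.mem_reverse]
              exact hpt ▸ hp
            · rw [List.map_reverse]
              exact List.nodup_reverse.2 hnodadds
          have hstep : loopB dead target (f + 1 + 1) dist ks cache =
              loopB dead target (f + 1) (dist ++ adds.reverse) ks' cache' := by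
            simp only [loopB, hfind, heq, if_neg hadds]
          rw [hstep]
          have : loopB dead target (f + 1) (dist ++ adds.reverse) ks' cache' = k + 1 := by
            simp only [loopB, hfd2]
          rw [this]
          simp [refBFS, if_neg hfre, hfound]
        · have hfre : fr ≠ ∅ := by
            intro h
            apply hadds
            have hexE : exF vis fr = ∅ := by simp [exF, h]
            cases hA : adds with
            | nil => rfl
            | cons p t =>
                have : p.1 ∈ adds.map Prod.fst := by rw [hA]; simp
                rw [hAddsEx p.1, hexE] at this
                simp at this
          have hstep : loopB dead target (f + 1 + 1) dist ks cache =
              loopB dead target (f + 1) (dist ++ adds.reverse) ks' cache' := by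
            simp only [loopB, hfind, heq, if_neg hadds]
          rw [hstep]
          have hrstep : refBFS target (f + 1) vis fr k =
              refBFS target f (vis ∪ exF vis fr) (exF vis fr) (k + 1) := by
            simp only [refBFS, if_neg hfre, if_neg hfound]
          rw [hrstep]
          have hkmem : ∀ x, x ∈ (dist ++ adds.reverse).map Prod.fst ↔
              x ∈ dist.map Prod.fst ∨ x ∈ adds.map Prod.fst := by
            intro x; simp [List.map_append, List.map_reverse]
          apply ih (dist ++ adds.reverse) ks' cache' (vis ∪ exF vis fr) (exF vis fr) (k + 1) hco'
          · rw [List.map_append, List.map_reverse]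
            refine List.Nodup.append hnd (List.nodup_reverse.2 hnodadds) ?_
            intro a ha hb
            rw [List.mem_reverse] at hb
            exact ((hkeysA a).1 hb).2.2 ((hks a).2 ha)
          · intro x
            rw [hkmem x]
            constructor
            · intro hx
              rcases (hks' x).1 hx with h | ⟨hex, hd⟩
              · exact Or.inl ((hks x).1 h)
              · by_cases hxk : x ∈ ks
                · exact Or.inl ((hks x).1 hxk)
                · exact Or.inr ((hkeysA x).2 ⟨hex, hd, hxk⟩)
            · rintro (h | h)
              · exact (hks' x).2 (Or.inl ((hks x).2 h))
              · obtain ⟨hex, hd, _⟩ := (hkeysA x).1 h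
                exact (hks' x).2 (Or.inr ⟨hex, hd⟩)
          · intro x
            rw [Finset.mem_union, hkmem x]
            constructor
            · rintro (h | h)
              · rcases (hvis x).1 h with h' | h'
                · exact Or.inl h'
                · exact Or.inr (Or.inl h')
              · exact Or.inr (Or.inr ((hAddsEx x).2 h))
            · rintro (h | h | h)
              · exact Or.inl ((hvis x).2 (Or.inl h))
              · exact Or.inl ((hvis x).2 (Or.inr h))
              · exact Or.inr ((hAddsEx x).1 h)
          · intro x hx
            rw [hkmem x]
            exact Or.inr ((hAddsEx x).2 hx)
          · intro p hp hpfr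
            rcases List.mem_append.1 hp with h | h
            · exfalso
              have hpvis : p.1 ∈ vis := (hvis p.1).2 (Or.inr (List.mem_map.2 ⟨p, h, rfl⟩))
              have := Finset.mem_sdiff.1 hpfr
              exact this.2 hpvis
            · exact hVal21 p (List.mem_reverse.1 h)
          · intro p hp hpfr nb hnb
            rw [Finset.mem_union]
            rcases List.mem_append.1 hp with h | h
            · by_cases hpf : p.1 ∈ fr
              · by_cases hnv : nb ∈ vis
                · exact Or.inl hnv
                · exact Or.inr (Finset.mem_sdiff.2
                    ⟨Finset.mem_biUnion.2 ⟨p.1, hpf, List.mem_toFinset.2 hnb⟩, hnv⟩)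
              · exact Or.inl (hcl p h hpf nb hnb)
            · exfalso
              apply hpfr
              rw [← hAddsEx p.1]
              exact List.mem_map.2 ⟨p, List.mem_reverse.1 h, rfl⟩
          · rw [hkmem target]
            rintro (h | h)
            · exact htgt h
            · exact hfound ((hAddsEx target).1 h)

-- ---- top level ----

theorem loopB_succ (dead : Std.HashSet String) (target : String) (f : Nat)
    (dist : List (String × Int)) (ks : Std.HashSet String)
    (cache : Std.HashMap String (List String)) :
    loopB dead target (f + 1) dist ks cache =
      match findVal dist target with
      | some v => v
      | none =>
          match relaxRound dead dist cache [] ks with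
          | (addsRev, ks', cache') =>
            if addsRev = [] then -1
            else loopB dead target f (dist ++ addsRev.reverse) ks' cache' := by
  simp only [loopB]

theorem avoid_deadends_eq (deadends : List String) (target : String) :
    avoid_deadends deadends target = avoid_deadends_alt deadends target := by
  by_cases h0 : "0000" ∈ Std.HashSet.ofList deadends
  · -- "0000" is a deadend: the start is popped as visited / never seeded, both give -1
    have hi : innerA target 1 [("0000", 0)] (Std.HashSet.ofList deadends) [] =
        .inr ([], Std.HashSet.ofList deadends) := by
      simp [innerA, h0]
    have hA : avoid_deadends deadends target = -1 := by
      show outerA target (20000 + 1) [("0000", 0)] (Std.HashSet.ofList deadends) = -1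
      rw [outerA_step target 20000 _ _ (by simp)]
      simp only [List.length_cons, List.length_nil, zero_add, hi]
      exact outerA_nil target 19999 _
    rw [hA, avoid_deadends_alt]
    simp only [if_pos h0, List.map_nil]
    rw [show (20001 : Nat) = 20000 + 1 by norm_num, loopB_succ]
    simp [findVal, relaxRound]
  · by_cases ht : target = "0000"
    · -- the start itself is the target: A returns its depth 0, B finds it in the table
      have hi : innerA target 1 [("0000", 0)] (Std.HashSet.ofList deadends) [] = .inl 0 := by
        simp [innerA, h0, ht]
      have hA : avoid_deadends deadends target = 0 := by
        show outerA target (20000 + 1) [("0000", 0)] (Std.HashSet.ofList deadends) = 0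
        rw [outerA_step target 20000 _ _ (by simp)]
        simp only [List.length_cons, List.length_nil, zero_add, hi]
      rw [hA, avoid_deadends_alt]
      simp only [if_neg h0]
      rw [show (20001 : Nat) = 20000 + 1 by norm_num, loopB_succ]
      simp [findVal, ht]
    · -- general case: both programs equal the reference level BFS with fuel 20000
      have hA : avoid_deadends deadends target =
          refBFS target 20000 (insert "0000" deadends.toFinset) {"0000"} 0 := by
        show outerA target (20000 + 1) [("0000", 0)] (Std.HashSet.ofList deadends) = _
        apply outerA_eq_ref target 20000 [("0000", 0)] (Std.HashSet.ofList deadends)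
        · simp
        · intro x
          simp [Std.HashSet.mem_ofList, Or.comm]
        · intro x
          simp only [Finset.mem_singleton, List.map_cons, List.map_nil, List.mem_cons,
            List.not_mem_nil, or_false]
          constructor
          · rintro rfl; exact ⟨rfl, h0⟩
          · rintro ⟨h, _⟩; exact h
        · rintro ⟨h, _⟩
          simp only [List.map_cons, List.map_nil, List.mem_cons, List.not_mem_nil, or_false] at h
          exact ht h
      have hB : loopB (Std.HashSet.ofList deadends) target (20000 + 1) [("0000", 0)]
          (Std.HashSet.ofList ([("0000", (0 : Int))].map Prod.fst))
          Std.HashMap.emptyWithCapacity =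
          refBFS target 20000 (insert "0000" deadends.toFinset) {"0000"} 0 := by
        apply loopB_eq_ref
        · intro s l h
          simp at h
        · simp
        · intro x
          simp [Std.HashSet.mem_ofList]
          exact eq_comm
        · intro x
          simp [Std.HashSet.mem_ofList]
          tauto
        · intro x hx
          simp only [Finset.mem_singleton] at hx
          simp [hx]
        · intro p hp _
          simp only [List.mem_cons, List.not_mem_nil, or_false] at hp
          rw [hp]
        · intro p hp hpf
          exfalso
          simp only [List.mem_cons, List.not_mem_nil, or_false] at hp
          apply hpf
          rw [hp]
          simp
        · simp [ht]
      rw [hA, avoid_deadends_alt]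
      simp only [if_neg h0]
      rw [show (20001 : Nat) = 20000 + 1 by norm_num, hB]

-- ===== VERDICT (by name: the statement is the Claim_ definition above) =====
theorem avoid_deadends_spec : Claim_equal_avoid_deadends := by
  intro deadends target _
  unfold Spec_avoid_deadends
  exact avoid_deadends_eq deadends target
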